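-- pv_equiv track=rewrite | github.com/SamMalcolm/media_meta_data_collector | next.py | generateXML
-- ===== SOURCE A (Python) =====
-- def generateXML(crew_arr, crew_key):
-- 	string = ""
-- 	string += "<key>" + crew_key + "</key>\n"
-- 	string += "<array>\n"
-- 	crewcount = 0
-- 	crewmembers = []
-- 	for member in crew_arr:
-- 		crewcount += 1
-- 		if crewcount < 11 and member not in crewmembers:
-- 			crewmembers.append(member)
-- 			string += "<dict>\n"
-- 			string += "<key>name</key>\n"
-- 			string += "<string>" + member + "</string>\n"
-- 			string += "</dict>\n"
-- 	string += "</array>"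
-- 	return string
-- ===== SOURCE B (Python) =====
-- def generateXML(crew_arr, crew_key):
--     # Stateless recursion over positions of the first-ten prefix, built back-to-front:
--     # position i contributes a block iff it is the FIRST occurrence of its member
--     # (prefix.index(m) == i), so no seen-list is maintained at all.
--     prefix = crew_arr[:10]
--
--     def blocks(i):
--         if i >= len(prefix):
--             return "</array>"
--         m = prefix[i]
--         rest = blocks(i + 1)
--         if prefix.index(m) == i:
--             return "<dict>\n<key>name</key>\n<string>" + m + "</string>\n</dict>\n" + rest
--         return rest
--
--     return "<key>" + crew_key + "</key>\n<array>\n" + blocks(0)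
-- ===== Notes on version B (the rewrite author's own statement) =====
-- stated objective: alternative
-- what changed: Replaces A's stateful single loop (counter plus growing seen-list with membership scans) by a stateless recursion over the positions of the first-ten prefix that builds the string back-to-front and decides emission positionally: position i emits iff prefix.index(m) == i (first occurrence), so no accumulator of seen members exists at all.
import Mathlib
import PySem

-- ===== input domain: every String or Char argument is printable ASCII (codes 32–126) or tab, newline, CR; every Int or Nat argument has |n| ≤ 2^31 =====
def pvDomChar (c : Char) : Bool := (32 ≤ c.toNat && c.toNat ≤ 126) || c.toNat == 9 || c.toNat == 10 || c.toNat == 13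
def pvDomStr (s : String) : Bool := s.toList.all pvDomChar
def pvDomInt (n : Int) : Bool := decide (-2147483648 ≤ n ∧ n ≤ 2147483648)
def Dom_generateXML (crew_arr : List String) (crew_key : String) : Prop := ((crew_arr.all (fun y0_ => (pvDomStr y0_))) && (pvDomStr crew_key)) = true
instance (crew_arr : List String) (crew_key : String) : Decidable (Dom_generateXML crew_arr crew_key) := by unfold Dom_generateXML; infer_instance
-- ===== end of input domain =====

-- B replaces A's stateful loop (counter + growing seen-list) by a stateless back-to-front
-- recursion over the positions of the first-ten prefix, deciding emission positionally
-- (prefix.index(m) == i, i.e. first occurrence); an alternative of similar cost.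


-- ===== PORT A =====
-- one loop step of A's for-loop: state is (string, crewcount, crewmembers)
def pvStepA (acc : String × Int × List String) (member : String) : String × Int × List String :=
  let s := acc.1
  let c := acc.2.1 + 1
  let ms := acc.2.2
  if c < 11 ∧ ms.contains member = false then
    ((((s ++ "<dict>\n") ++ "<key>name</key>\n") ++ (("<string>" ++ member) ++ "</string>\n")) ++ "</dict>\n",
     c, ms ++ [member])
  else (s, c, ms)

def generateXML (crew_arr : List String) (crew_key : String) : String :=
  let s0 := ("" ++ (("<key>" ++ crew_key) ++ "</key>\n")) ++ "<array>\n"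
  let r := crew_arr.foldl pvStepA (s0, 0, [])
  r.1 ++ "</array>"

-- ===== PORT B =====
-- B's inner recursion 'blocks(i)' over the positions of the prefix (back-to-front build;
-- emission decided by 'prefix.index(m) == i', ported as PySem.List.index?)
def pvBlocks (pre : List String) (i : Nat) : String :=
  if h : i < pre.length then
    let m := pre[i]
    let rest := pvBlocks pre (i + 1)
    if PySem.List.index? pre m = some i then
      ((("<dict>\n<key>name</key>\n<string>" ++ m) ++ "</string>\n</dict>\n") ++ rest)
    else rest
  else "</array>"
termination_by pre.length - i

def generateXML_alt (crew_arr : List String) (crew_key : String) : String :=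
  let pre := PySem.List.slice crew_arr none (some 10)
  (("<key>" ++ crew_key) ++ "</key>\n<array>\n") ++ pvBlocks pre 0

-- ===== PRECONDITION & SPEC =====
def Spec_generateXML (crew_arr : List String) (crew_key : String) (out : String) : Prop := out = generateXML_alt crew_arr crew_key
instance (crew_arr : List String) (crew_key : String) (out : String) : Decidable (Spec_generateXML crew_arr crew_key out) := by unfold Spec_generateXML; infer_instance

-- ===== CLAIM =====
def Claim_equal_generateXML : Prop := ∀ (crew_arr : List String) (crew_key : String), Dom_generateXML crew_arr crew_key → Spec_generateXML crew_arr crew_key (generateXML crew_arr crew_key)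

-- ===== LEMMAS AND PROOFS =====

-- one emitted XML block
def pvBlockB (m : String) : String :=
  ("<dict>\n<key>name</key>\n<string>" ++ m) ++ "</string>\n</dict>\n"

-- the body A's loop appends, given the members already seen
def pvBody (ms : List String) : List String → String
  | [] => ""
  | h :: t => if ms.contains h then pvBody ms t else pvBlockB h ++ pvBody (ms ++ [h]) t

theorem pvBlockA_eq (s m : String) :
    (((s ++ "<dict>\n") ++ "<key>name</key>\n") ++ (("<string>" ++ m) ++ "</string>\n")) ++ "</dict>\n"
      = s ++ pvBlockB m := by
  simp only [pvBlockB, String.append_assoc]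
  rfl

-- A's loop beyond the tenth element changes nothing but the counter
theorem foldA_tail (l : List String) (s : String) (c : Int) (ms : List String) (hc : 10 ≤ c) :
    (l.foldl pvStepA (s, c, ms)).1 = s := by
  induction l generalizing c with
  | nil => rfl
  | cons h t ih =>
    simp only [List.foldl_cons, pvStepA]
    rw [if_neg (by intro hand; omega)]
    exact ih (c + 1) (by omega)

-- the new members A's loop collects, in order, given the members already seen
def pvNews (ms : List String) : List String → List String
  | [] => []
  | h :: t => if ms.contains h then pvNews ms t else h :: pvNews (ms ++ [h]) t

-- A's loop over at most its first ten elements: full characterisation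
theorem foldA_head (l : List String) (s : String) (c : Int) (ms : List String)
    (hc : c + l.length ≤ 10) :
    l.foldl pvStepA (s, c, ms)
      = (s ++ pvBody ms l, c + l.length, ms ++ pvNews ms l) := by
  induction l generalizing s c ms with
  | nil => simp [pvBody, pvNews, String.append_empty]
  | cons h t ih =>
    by_cases hm : h ∈ ms
    · have hmc : ms.contains h = true := by simpa using hm
      simp only [List.foldl_cons, pvStepA]
      rw [if_neg (by rintro ⟨-, hfalse⟩; rw [hmc] at hfalse; cases hfalse)]
      rw [ih s (c + 1) ms (by simp at hc ⊢; omega)]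
      simp only [pvBody, pvNews, hmc, if_true, Prod.mk.injEq]
      refine ⟨trivial, ?_, trivial⟩
      simp only [List.length_cons]; push_cast; omega
    · have hmc : ms.contains h = false := by simpa using hm
      simp only [List.foldl_cons, pvStepA]
      rw [if_pos ⟨by simp at hc ⊢; omega, hmc⟩]
      rw [ih _ (c + 1) (ms ++ [h]) (by simp at hc ⊢; omega)]
      rw [pvBlockA_eq]
      simp only [pvBody, pvNews, hmc, if_false, Bool.false_eq_true, Prod.mk.injEq]
      refine ⟨by rw [String.append_assoc], by simp only [List.length_cons]; push_cast; omega, by simp⟩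

-- A's whole loop: string component, for any starting string
theorem foldA_full (arr : List String) (s0 : String) :
    (arr.foldl pvStepA (s0, 0, [])).1 = s0 ++ pvBody [] (arr.take 10) := by
  conv_lhs => rw [← List.take_append_drop 10 arr]
  rw [List.foldl_append,
      foldA_head (arr.take 10) s0 0 [] (by simp [List.length_take])]
  by_cases hlen : arr.length ≤ 10
  · rw [List.drop_eq_nil_of_le hlen]; rfl
  · exact foldA_tail _ _ _ _ (by simp [List.length_take]; omega)

-- pvBody depends only on the membership predicate of the seen list
theorem pvBody_congr (l : List String) (ms₁ ms₂ : List String)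
    (h : ∀ x, x ∈ ms₁ ↔ x ∈ ms₂) : pvBody ms₁ l = pvBody ms₂ l := by
  induction l generalizing ms₁ ms₂ with
  | nil => rfl
  | cons a t ih =>
    have hc : ms₁.contains a = ms₂.contains a := by
      by_cases ha : a ∈ ms₁
      · simp [ha, (h a).mp ha]
      · have ha2 : a ∉ ms₂ := fun hx => ha ((h a).mpr hx)
        simp [ha, ha2]
    simp only [pvBody, hc]
    by_cases h2 : ms₂.contains a = true
    · rw [if_pos h2, if_pos h2]; exact ih ms₁ ms₂ h
    · rw [if_neg h2, if_neg h2, ih (ms₁ ++ [a]) (ms₂ ++ [a]) (by intro x; simp [h x])]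

-- positional first-occurrence test ↔ absence from the earlier prefix
theorem index?_eq_self_iff (pre : List String) (i : Nat) (hi : i < pre.length) :
    PySem.List.index? pre pre[i] = some i ↔ pre[i] ∉ pre.take i := by
  rw [PySem.List.index?_eq_some_iff]
  constructor
  · rintro ⟨p, sfx, hps, hlen, hnot⟩
    have : pre.take i = p := by
      subst hlen; rw [hps]; simp
    rw [this]; exact hnot
  · intro h
    refine ⟨pre.take i, pre.drop (i + 1), ?_, by simp [List.length_take]; omega, h⟩
    conv_lhs => rw [← List.take_append_drop i pre]
    rw [List.drop_eq_getElem_cons hi]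

-- B's recursion equals A's body of the remaining positions (plus the footer)
theorem pvBlocks_eq_pvBody (pre : List String) (i : Nat) (hi : i ≤ pre.length) :
    pvBlocks pre i = pvBody (pre.take i) (pre.drop i) ++ "</array>" := by
  induction hn : pre.length - i generalizing i with
  | zero =>
    have hlen : i = pre.length := by omega
    subst hlen
    rw [pvBlocks, dif_neg (by omega), List.drop_length]
    simp [pvBody, String.empty_append]
  | succ n ih =>
    have hlt : i < pre.length := by omega
    rw [pvBlocks, dif_pos hlt, List.drop_eq_getElem_cons hlt]
    have hrest := ih (i + 1) (by omega) (by omega)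
    by_cases hfirst : pre[i] ∈ pre.take i
    · have hc : (pre.take i).contains pre[i] = true := by simpa using hfirst
      have hiff : ∀ x, x ∈ pre.take (i + 1) ↔ x ∈ pre.take i := by
        intro x
        rw [List.take_add_one, List.getElem?_eq_getElem hlt]
        simp only [Option.toList, List.mem_append, List.mem_singleton]
        constructor
        · rintro (hx | rfl)
          · exact hx
          · exact hfirst
        · exact Or.inl
      rw [if_neg (by rw [index?_eq_self_iff pre i hlt]; simp [hfirst])]
      simp only [pvBody, hc, if_true]
      rw [hrest, pvBody_congr (pre.drop (i + 1)) (pre.take (i + 1)) (pre.take i) hiff]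
    · have hc : (pre.take i).contains pre[i] = false := by simpa using hfirst
      rw [if_pos ((index?_eq_self_iff pre i hlt).mpr hfirst)]
      simp only [pvBody, hc, Bool.false_eq_true, if_false]
      rw [hrest, List.take_add_one, List.getElem?_eq_getElem hlt]
      simp only [Option.toList, pvBlockB, String.append_assoc]

-- ===== VERDICT =====
theorem generateXML_spec : Claim_equal_generateXML := by
  intro arr key _
  show (arr.foldl pvStepA ((("" ++ (("<key>" ++ key) ++ "</key>\n")) ++ "<array>\n"), 0, [])).1 ++ "</array>"
      = (("<key>" ++ key) ++ "</key>\n<array>\n") ++ pvBlocks (PySem.List.slice arr none (some 10)) 0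
  rw [foldA_full, PySem.List.slice_to (xs := arr) (b := 10) (by norm_num)]
  have h10 : ((10 : Int)).toNat = 10 := rfl
  rw [h10, pvBlocks_eq_pvBody (arr.take 10) 0 (by omega)]
  simp only [List.take_zero, List.drop_zero, String.empty_append, String.append_assoc]
  rfl
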